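-- pv_equiv track=rewrite | github.com/TylerMorley/advent-of-code | 2023/code/day07.py | getBestHand
-- ===== SOURCE A (Python) =====
-- def getBestHand(hands, card_index):
--     card_value = {'A':13, 'K': 12, 'Q': 11, 'J': 10, 'T': 9, '9': 8, '8':7, '7':6, '6':5, '5':4, '4':3, '3':2, '2':1, '1':0}
--     first = ['11111']
--     for hand in hands:
--         hand_value = card_value[hand[card_index]]
--         first_value = card_value[first[0][card_index]]
--         if hand_value > first_value:
--             first = [hand]
--         elif hand_value == first_value:
--             first.append(hand)
--     return first
-- ===== SOURCE B (Python) =====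
-- def getBestHand(hands, card_index):
--     card_value = {'A':13, 'K': 12, 'Q': 11, 'J': 10, 'T': 9, '9': 8, '8':7, '7':6, '6':5, '5':4, '4':3, '3':2, '2':1, '1':0}
--     candidates = ['11111'] + list(hands)
--     m = max(card_value[h[card_index]] for h in candidates)
--     return [h for h in candidates if card_value[h[card_index]] == m]
-- ===== Notes on version B (the rewrite author's own statement) =====
-- stated objective: alternative
-- what changed: Replaces A's single-pass running-max accumulator (reset on a strictly greater hand, append on ties) with a max reduction over the sentinel-augmented candidate list followed by an order-preserving filter for the maximal value.
-- outside the precondition, e.g. on getBestHand([], 7): A returns ['11111'], B raises IndexError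
import Mathlib
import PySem

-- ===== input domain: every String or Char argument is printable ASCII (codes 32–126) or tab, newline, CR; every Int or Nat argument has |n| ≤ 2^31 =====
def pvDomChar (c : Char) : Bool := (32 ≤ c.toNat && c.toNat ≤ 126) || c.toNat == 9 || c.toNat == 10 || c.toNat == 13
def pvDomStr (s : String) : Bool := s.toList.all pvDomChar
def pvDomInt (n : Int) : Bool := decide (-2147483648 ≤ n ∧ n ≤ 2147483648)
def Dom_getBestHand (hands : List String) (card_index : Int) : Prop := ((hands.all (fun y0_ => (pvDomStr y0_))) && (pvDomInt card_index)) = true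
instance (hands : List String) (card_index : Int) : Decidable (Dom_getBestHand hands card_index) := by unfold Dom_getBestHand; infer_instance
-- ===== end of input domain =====

-- B replaces A's running-max-with-ties accumulator by a max reduction plus an order-preserving
-- filter over the same sentinel-augmented candidate list (alternative decomposition, same cost).

-- the card_value dict of both programs
def cardValue : PySem.Dict Char Int :=
  PySem.Dict.ofList [('A',13), ('K',12), ('Q',11), ('J',10), ('T',9), ('9',8), ('8',7),
                     ('7',6), ('6',5), ('5',4), ('4',3), ('3',2), ('2',1), ('1',0)]

-- ===== PORT A =====
-- card_value[hand[card_index]]: under Pre_ the index is in range and the char is a key,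
-- so the defaults of getD/pyGet? are never taken.
def getBestHand (hands : List String) (card_index : Int) : List String :=
  hands.foldl (fun first hand =>
    let hand_value := cardValue.getD ((PySem.Str.pyGet? hand card_index).getD ' ') 0
    let first_value := cardValue.getD ((PySem.Str.pyGet? (first.headD "") card_index).getD ' ') 0
    if hand_value > first_value then [hand]
    else if hand_value = first_value then first ++ [hand]
    else first) ["11111"]

-- ===== PORT B =====
-- card_value[h[card_index]] as a helper (same defaults, never taken under Pre_)
def cardAt (card_index : Int) (h : String) : Int :=
  cardValue.getD ((PySem.Str.pyGet? h card_index).getD ' ') 0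

def getBestHand_alt (hands : List String) (card_index : Int) : List String :=
  let candidates := "11111" :: hands
  let m := (PySem.List.max? (candidates.map (cardAt card_index)) (fun y => y)).getD 0
  candidates.filter (fun h => cardAt card_index h == m)

-- ===== PRECONDITION & SPEC =====
-- Pre_ excludes the inputs where Python A raises (card_index out of range for a hand or for
-- the sentinel '11111', or an indexed character that is not a card_value key).  It also
-- excludes ([], out-of-range card_index), where A returns the bare ['11111'] only because its
-- empty loop never evaluates the index; B's natural max pass evaluates it and raises there.
def Pre_getBestHand (hands : List String) (card_index : Int) : Prop :=
  PySem.Raise.InRange 5 card_index ∧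
  ∀ h ∈ hands, (PySem.Str.pyGet? h card_index).isSome = true ∧
    (PySem.Str.pyGet? h card_index).getD ' '
      ∈ ['A','K','Q','J','T','9','8','7','6','5','4','3','2','1']
instance (hands : List String) (card_index : Int) : Decidable (Pre_getBestHand hands card_index) := by
  unfold Pre_getBestHand; infer_instance

def pvWitness_getBestHand : List String × Int := (["23456", "A2345", "A9999"], 0)

def Spec_getBestHand (hands : List String) (card_index : Int) (out : List String) : Prop :=
  out = getBestHand_alt hands card_index
instance (hands : List String) (card_index : Int) (out : List String) : Decidable (Spec_getBestHand hands card_index out) := by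
  unfold Spec_getBestHand; infer_instance

-- ===== CLAIM (what is proved, stated in full; the proofs are below) =====
def Claim_equal_getBestHand : Prop := ∀ (hands : List String) (card_index : Int), Dom_getBestHand hands card_index → Pre_getBestHand hands card_index → Spec_getBestHand hands card_index (getBestHand hands card_index)

-- ===== LEMMAS AND PROOFS =====

lemma headD_append_of_ne_nil {α : Type} (acc : List α) (h : acc ≠ []) (xs : List α) (d : α) :
    (acc ++ xs).headD d = acc.headD d := by
  cases acc with
  | nil => exact absurd rfl h
  | cons a t => rfl

-- A's loop, run from any accumulator that is the filter of an already-seen prefix at its max,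
-- equals the filter of prefix ++ rest at the overall max.
lemma loop_eq (f : String → Int) :
    ∀ (rest pref acc : List String) (m : Int),
      acc = pref.filter (fun h => f h == m) →
      f (acc.headD "") = m →
      acc ≠ [] →
      (∀ a ∈ pref, f a ≤ m) →
      rest.foldl (fun first hand =>
        if f hand > f (first.headD "") then [hand]
        else if f hand = f (first.headD "") then first ++ [hand]
        else first) acc
      = (pref ++ rest).filter (fun h => f h == (rest.map f).foldl max m) := by
  intro rest
  induction rest with
  | nil =>
    intro pref acc m hacc _ _ _
    simpa using hacc
  | cons h rest ih =>
    intro pref acc m hacc hhead hne hbd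
    simp only [List.foldl_cons, List.map_cons, hhead]
    rcases lt_trichotomy m (f h) with hgt | heq | hlt
    · rw [if_pos hgt]
      have hmax : max m (f h) = f h := max_eq_right (le_of_lt hgt)
      have := ih (pref ++ [h]) [h] (f h)
        (by
          rw [List.filter_append]
          have : pref.filter (fun x => f x == f h) = [] := by
            apply List.filter_eq_nil_iff.mpr
            intro a ha
            have : f a ≤ m := hbd a ha
            simp only [beq_iff_eq]
            omega
          simp [this])
        (by rfl) (by simp)
        (by
          intro a ha
          rcases List.mem_append.mp ha with h1 | h1
          · exact le_of_lt (lt_of_le_of_lt (hbd a h1) hgt)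
          · simp at h1; simp [h1])
      rw [this, hmax]
      simp
    · rw [if_neg (by omega), if_pos heq.symm]
      have hmax : max m (f h) = m := max_eq_left (le_of_eq heq.symm)
      have := ih (pref ++ [h]) (acc ++ [h]) m
        (by rw [List.filter_append, hacc]; simp [← heq])
        (by rw [headD_append_of_ne_nil acc hne]; exact hhead)
        (by simp)
        (by
          intro a ha
          rcases List.mem_append.mp ha with h1 | h1
          · exact hbd a h1
          · simp at h1; subst h1; omega)
      rw [this, hmax]
      simp
    · rw [if_neg (by omega), if_neg (by omega)]
      have hmax : max m (f h) = m := max_eq_left (le_of_lt hlt)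
      have := ih (pref ++ [h]) acc m
        (by
          rw [List.filter_append, hacc]
          have hnil : [h].filter (fun x => f x == m) = [] := by
            apply List.filter_eq_nil_iff.mpr
            intro a ha
            simp only [List.mem_singleton] at ha
            subst ha
            simp only [beq_iff_eq]
            omega
          simp [hnil])
        hhead hne
        (by
          intro a ha
          rcases List.mem_append.mp ha with h1 | h1
          · exact hbd a h1
          · simp at h1; subst h1; omega)
      rw [this, hmax]
      simp

lemma getBestHand_eq_filter (hands : List String) (i : Int) :
    getBestHand hands i
      = ("11111" :: hands).filter
          (fun h => cardAt i h == (hands.map (cardAt i)).foldl max (cardAt i "11111")) := by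
  have := loop_eq (cardAt i) hands ["11111"] ["11111"] (cardAt i "11111")
    (by simp) (by rfl) (by simp) (by intro a ha; simp at ha; simp [ha])
  simpa [getBestHand, cardAt] using this

lemma getBestHand_alt_eq_filter (hands : List String) (i : Int) :
    getBestHand_alt hands i
      = ("11111" :: hands).filter
          (fun h => cardAt i h == (hands.map (cardAt i)).foldl max (cardAt i "11111")) := by
  unfold getBestHand_alt
  simp only [List.map_cons, PySem.List.max?_id_cons, Option.getD_some]

-- ===== VERDICT (by name: the statement is the Claim_ definition above) =====
theorem getBestHand_spec : Claim_equal_getBestHand := by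
  intro hands card_index _ _
  unfold Spec_getBestHand
  rw [getBestHand_eq_filter, getBestHand_alt_eq_filter]
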